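-- pv_equiv track=rewrite | github.com/DanielDobromylskyj/QuartusUnlogicalSim | loader/__init__.py | split_at_spaces
-- ===== SOURCE A (Python) =====
-- def split_at_spaces(text):
--     text = text.replace("\t", " ")
--     chunks = []
--     chunk = ""
--
--     depth = 0
--     in_string = False
--
--     for char in text:
--         chunk += char
--
--         if not in_string:
--             if char == '"':
--                 in_string = True
--
--             if char == " " and depth == 0:
--                 chunks.append(chunk.strip())
--                 chunk = ""
--
--             if char == "(":
--                 depth += 1
--
--             if char == ")":
--                 depth -= 1
--
--         else:
--             if char == '"':
--                 in_string = False
--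
--     chunks.append(chunk.strip())
--     return chunks
-- ===== SOURCE B (Python) =====
-- def split_at_spaces(text):
--     norm = text.replace("\t", " ")
--     # pass 1: record indices of top-level splitting spaces
--     cuts = []
--     depth = 0
--     in_string = False
--     for i, ch in enumerate(norm):
--         if in_string:
--             if ch == '"':
--                 in_string = False
--         else:
--             if ch == '"':
--                 in_string = True
--             elif ch == " " and depth == 0:
--                 cuts.append(i)
--             elif ch == "(":
--                 depth += 1
--             elif ch == ")":
--                 depth -= 1
--     # pass 2: slice between consecutive cut points and strip
--     out = []
--     start = 0
--     for c in cuts: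
--         out.append(norm[start:c].strip())
--         start = c + 1
--     out.append(norm[start:].strip())
--     return out
-- ===== Notes on version B (the rewrite author's own statement) =====
-- stated objective: alternative
-- what changed: Replaced A's single chunk-accumulating scan with a two-pass decomposition: one state-machine pass that only records the indices of top-level splitting spaces, then a second pass that slices the tab-normalized text between consecutive cut points and strips each slice.
import Mathlib
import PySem

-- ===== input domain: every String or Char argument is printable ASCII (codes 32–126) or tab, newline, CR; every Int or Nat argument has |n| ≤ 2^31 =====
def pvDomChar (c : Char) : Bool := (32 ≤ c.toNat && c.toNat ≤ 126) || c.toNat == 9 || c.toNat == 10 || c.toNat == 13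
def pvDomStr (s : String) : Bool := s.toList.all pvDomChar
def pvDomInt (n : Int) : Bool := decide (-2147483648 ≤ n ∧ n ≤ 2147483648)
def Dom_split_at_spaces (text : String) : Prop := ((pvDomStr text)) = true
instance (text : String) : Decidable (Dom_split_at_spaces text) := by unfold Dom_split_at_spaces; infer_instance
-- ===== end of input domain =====

-- B replaces A's single chunk-accumulating scan by a two-pass decomposition:
-- one scan records the indices of the top-level spaces, a second pass slices
-- the text between consecutive cut points and strips each slice (objective:
-- alternative decomposition, same cost).

-- ===== PORT A =====
-- A's loop state: accumulated chunks, current chunk, depth, in_string.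
def pvALoop : List Char → List String → String → Int → Bool → List String
  | [], chunks, chunk, _, _ => chunks ++ [PySem.Str.strip chunk]
  | ch :: rest, chunks, chunk, depth, in_string =>
    let chunk := chunk.push ch
    if !in_string then
      -- Python's four consecutive `if`s, in order
      let in_string := if ch = '"' then true else in_string
      let (chunks, chunk) :=
        if ch = ' ' ∧ depth = 0 then (chunks ++ [PySem.Str.strip chunk], "") else (chunks, chunk)
      let depth := if ch = '(' then depth + 1 else depth
      let depth := if ch = ')' then depth - 1 else depth
      pvALoop rest chunks chunk depth in_string
    else
      let in_string := if ch = '"' then false else in_string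
      pvALoop rest chunks chunk depth in_string

def split_at_spaces (text : String) : List String :=
  let text := PySem.Str.replace text "\t" " "
  pvALoop text.toList [] "" 0 false

-- ===== PORT B =====
-- pass 1 of Source B: indices of top-level splitting spaces
def pvCuts : List Char → Nat → Int → Bool → List Nat
  | [], _, _, _ => []
  | ch :: rest, i, depth, in_string =>
    if in_string then
      if ch = '"' then pvCuts rest (i + 1) depth false
      else pvCuts rest (i + 1) depth in_string
    else
      if ch = '"' then pvCuts rest (i + 1) depth true
      else if ch = ' ' ∧ depth = 0 then i :: pvCuts rest (i + 1) depth in_string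
      else if ch = '(' then pvCuts rest (i + 1) (depth + 1) in_string
      else if ch = ')' then pvCuts rest (i + 1) (depth - 1) in_string
      else pvCuts rest (i + 1) depth in_string

-- pass 2 of Source B: slice between consecutive cut points and strip
def pvBuild (norm : String) : Nat → List Nat → List String
  | start, [] => [PySem.Str.strip (PySem.Str.slice norm (some (start : Int)) none)]
  | start, c :: cs =>
    PySem.Str.strip (PySem.Str.slice norm (some (start : Int)) (some (c : Int)))
      :: pvBuild norm (c + 1) cs

def split_at_spaces_alt (text : String) : List String :=
  let norm := PySem.Str.replace text "\t" " "
  pvBuild norm 0 (pvCuts norm.toList 0 0 false)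

-- ===== PRECONDITION & SPEC =====
def Spec_split_at_spaces (text : String) (out : List String) : Prop := out = split_at_spaces_alt text
instance (text : String) (out : List String) : Decidable (Spec_split_at_spaces text out) := by unfold Spec_split_at_spaces; infer_instance

-- ===== CLAIM (what is proved, stated in full; the proofs are below) =====
def Claim_equal_split_at_spaces : Prop := ∀ (text : String), Dom_split_at_spaces text → Spec_split_at_spaces text (split_at_spaces text)

-- ===== LEMMAS AND PROOFS =====

-- Common intermediate: the segments of the remaining text, given the pending
-- (already scanned, not yet cut) characters and the scanner state.
def pvSegs : List Char → List Char → Int → Bool → List String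
  | pend, [], _, _ => [String.ofList (PySem.Chars.strip pend)]
  | pend, ch :: rest, depth, in_string =>
    if in_string then
      pvSegs (pend ++ [ch]) rest depth (if ch = '"' then false else in_string)
    else
      if ch = '"' then pvSegs (pend ++ [ch]) rest depth true
      else if ch = ' ' ∧ depth = 0 then
        String.ofList (PySem.Chars.strip (pend ++ [ch])) :: pvSegs [] rest depth in_string
      else if ch = '(' then pvSegs (pend ++ [ch]) rest (depth + 1) in_string
      else if ch = ')' then pvSegs (pend ++ [ch]) rest (depth - 1) in_string
      else pvSegs (pend ++ [ch]) rest depth in_string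

theorem strip_eq (s : String) :
    PySem.Str.strip s = String.ofList (PySem.Chars.strip s.toList) := by
  apply String.toList_inj.mp; simp [PySem.Str.toList_strip]

-- stripping is unaffected by a trailing space
theorem strip_append_space (l : List Char) :
    PySem.Chars.strip (l ++ [' ']) = PySem.Chars.strip l := by
  unfold PySem.Chars.strip PySem.Chars.lstrip PySem.Chars.rstrip
  rw [List.dropWhile_append]
  by_cases h : (List.dropWhile PySem.Chars.isspace l).isEmpty
  · rw [if_pos h, List.isEmpty_iff.mp h]
    simp [List.dropWhile, show PySem.Chars.isspace ' ' = true from by decide]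
  · rw [if_neg h, List.reverse_append]
    simp only [List.reverse_cons, List.reverse_nil, List.nil_append, List.singleton_append]
    rw [List.dropWhile_cons]
    simp [show PySem.Chars.isspace ' ' = true from by decide]

-- A's loop computes the segments
theorem aLoop_eq_segs (cs : List Char) :
    ∀ (chunks : List String) (chunk : String) (depth : Int) (s : Bool),
      pvALoop cs chunks chunk depth s = chunks ++ pvSegs chunk.toList cs depth s := by
  induction cs with
  | nil => intro chunks chunk depth s; simp [pvALoop, pvSegs, strip_eq]
  | cons ch rest ih =>
    intro chunks chunk depth s
    simp only [pvALoop]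
    cases s with
    | false =>
      by_cases hq : ch = '"'
      · subst hq
        simp [pvSegs, ih]
      · by_cases hsp : ch = ' ' ∧ depth = 0
        · obtain ⟨hc, hd⟩ := hsp; subst hc; subst hd
          simp [pvSegs, ih, strip_eq, hq]
        · by_cases hop : ch = '('
          · subst hop
            simp [pvSegs, ih, hq]
          · by_cases hcl : ch = ')'
            · subst hcl
              simp [pvSegs, ih, hq]
            · simp [pvSegs, ih, hsp, hq, hop, hcl]
    | true =>
      by_cases hq : ch = '"'
      · subst hq; simp [pvSegs, ih]
      · simp [pvSegs, ih, hq]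

-- B's two passes compute the segments
theorem build_cuts_eq_segs (norm : String) (cs : List Char) :
    ∀ (start i : Nat) (depth : Int) (s : Bool),
      norm.toList.drop i = cs → start ≤ i →
      pvBuild norm start (pvCuts cs i depth s)
        = pvSegs ((norm.toList.drop start).take (i - start)) cs depth s := by
  induction cs with
  | nil =>
    intro start i depth s hdrop hle
    have hlen : norm.toList.length ≤ i := List.drop_eq_nil_iff.mp hdrop
    have htake : (norm.toList.drop start).take (i - start) = norm.toList.drop start := by
      apply List.take_of_length_le
      rw [List.length_drop]
      omega
    simp only [pvCuts, pvBuild, pvSegs, htake, List.cons.injEq, and_true]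
    apply String.toList_inj.mp
    simp [PySem.Str.toList_strip, PySem.Str.toList_slice, PySem.List.slice_from_natCast]
  | cons ch rest ih =>
    intro start i depth s hdrop hle
    have hget : norm.toList[i]? = some ch := by
      have := List.getElem?_drop (xs := norm.toList) (i := i) (j := 0)
      rw [hdrop] at this; simpa using this.symm
    have hrest : norm.toList.drop (i + 1) = rest := by
      have h : norm.toList.drop (i + 1) = (norm.toList.drop i).drop 1 := by
        rw [List.drop_drop]
      rw [h, hdrop, List.drop_one, List.tail_cons]
    have hpend : (norm.toList.drop start).take (i + 1 - start)
        = (norm.toList.drop start).take (i - start) ++ [ch] := by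
      have h1 : i + 1 - start = (i - start) + 1 := by omega
      rw [h1, List.take_add_one]
      congr 1
      have h2 := List.getElem?_drop (xs := norm.toList) (i := start) (j := i - start)
      have h3 : start + (i - start) = i := by omega
      rw [h3, hget] at h2
      simp [h2]
    cases s with
    | true =>
      by_cases hq : ch = '"'
      · subst hq
        simp only [pvCuts, reduceIte, pvSegs]
        rw [ih start (i + 1) depth false hrest (by omega), hpend]
      · simp only [pvCuts, if_neg hq, reduceIte, pvSegs]
        rw [ih start (i + 1) depth true hrest (by omega), hpend]
    | false =>
      by_cases hq : ch = '"'
      · subst hq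
        simp only [pvCuts, Bool.false_eq_true, reduceIte, pvSegs]
        rw [ih start (i + 1) depth true hrest (by omega), hpend]
      · by_cases hsp : ch = ' ' ∧ depth = 0
        · obtain ⟨hc, hd⟩ := hsp; subst hc; subst hd
          simp only [pvCuts, Bool.false_eq_true, reduceIte, if_neg hq, and_self,
            pvBuild, pvSegs, List.cons.injEq]
          refine ⟨?_, ?_⟩
          · apply String.toList_inj.mp
            simp [PySem.Str.toList_strip, PySem.Str.toList_slice,
              PySem.List.slice_natCast, strip_append_space]
          · rw [ih (i + 1) (i + 1) 0 false hrest (le_refl _)]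
            simp
        · by_cases hop : ch = '('
          · subst hop
            simp only [pvCuts, Bool.false_eq_true, reduceIte, if_neg hq, if_neg hsp, pvSegs]
            rw [ih start (i + 1) (depth + 1) false hrest (by omega), hpend]
          · by_cases hcl : ch = ')'
            · subst hcl
              simp only [pvCuts, Bool.false_eq_true, reduceIte, if_neg hq, if_neg hsp,
                if_neg hop, pvSegs]
              rw [ih start (i + 1) (depth - 1) false hrest (by omega), hpend]
            · simp only [pvCuts, Bool.false_eq_true, reduceIte, if_neg hq, if_neg hsp,
                if_neg hop, if_neg hcl, pvSegs]
              rw [ih start (i + 1) depth false hrest (by omega), hpend]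

-- ===== VERDICT (by name: the statement is the Claim_ definition above) =====
theorem split_at_spaces_spec : Claim_equal_split_at_spaces := by
  intro text _
  unfold Spec_split_at_spaces split_at_spaces split_at_spaces_alt
  rw [aLoop_eq_segs,
    build_cuts_eq_segs _ _ 0 0 0 false (by simp) (le_refl _)]
  simp
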